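-- pv_equiv track=rewrite | github.com/haxscramper/hack | testing/python/image_tagger/src/image_tagger/gui/fuzzy_file_selector.py | positions_to_spans
-- ===== SOURCE A (Python) =====
-- from typing import Iterable
--
-- def positions_to_spans(positions: Iterable[int]) -> list[tuple[int, int]]:
--     sorted_positions = sorted(set(positions))
--     if not sorted_positions:
--         return []
--
--     spans: list[tuple[int, int]] = []
--     start = sorted_positions[0]
--     prev = sorted_positions[0]
--
--     for pos in sorted_positions[1:]:
--         if pos == prev + 1:
--             prev = pos
--             continue
--         spans.append((start, prev + 1))
--         start = pos
--         prev = pos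
--
--     spans.append((start, prev + 1))
--     return spans
-- ===== SOURCE B (Python) =====
-- def positions_to_spans(positions):
--     # Boundary-filter method: p starts a span iff p-1 is not in the set;
--     # p ends one (exclusively, at p+1) iff p+1 is not in the set.
--     # The k-th start pairs with the k-th end, both taken in sorted order.
--     ps = set(positions)
--     xs = sorted(ps)
--     starts = [p for p in xs if p - 1 not in ps]
--     ends = [p + 1 for p in xs if p + 1 not in ps]
--     return list(zip(starts, ends))
-- ===== Notes on version B (the rewrite author's own statement) =====
-- stated objective: alternative
-- what changed: Replaces A's sequential (start, prev) state machine with a stateless boundary-filter method: span starts are exactly the positions whose predecessor is absent from the set, span ends those whose successor is absent, and zipping the two sorted boundary lists yields the spans.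
import Mathlib
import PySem

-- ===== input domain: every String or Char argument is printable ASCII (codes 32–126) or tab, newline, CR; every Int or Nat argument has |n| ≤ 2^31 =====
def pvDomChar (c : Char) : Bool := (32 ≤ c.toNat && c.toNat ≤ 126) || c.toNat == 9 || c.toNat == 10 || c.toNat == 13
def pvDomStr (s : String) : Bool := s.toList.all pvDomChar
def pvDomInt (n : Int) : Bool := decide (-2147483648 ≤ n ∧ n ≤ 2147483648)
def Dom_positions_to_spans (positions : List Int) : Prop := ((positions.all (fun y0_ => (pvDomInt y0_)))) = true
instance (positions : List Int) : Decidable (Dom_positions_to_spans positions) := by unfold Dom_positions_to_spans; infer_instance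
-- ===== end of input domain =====

-- B replaces A's sequential state machine by stateless boundary filters (starts = no predecessor in the set, ends = no successor) zipped together; objective: alternative.

-- ===== PORT A =====
-- one step of A's for-loop over sorted_positions[1:], state = (spans, start, prev)
def pvStepA (st : List (Int × Int) × Int × Int) (pos : Int) : List (Int × Int) × Int × Int :=
  if pos = st.2.2 + 1 then (st.1, st.2.1, pos)
  else (st.1 ++ [(st.2.1, st.2.2 + 1)], pos, pos)

def positions_to_spans (positions : List Int) : List (Int × Int) :=
  let sorted_positions := PySem.List.sorted (PySem.Set.ofList positions) (fun x => x) false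
  match sorted_positions with
  | [] => []
  | s0 :: rest =>
    let st := rest.foldl pvStepA ([], s0, s0)
    st.1 ++ [(st.2.1, st.2.2 + 1)]

-- ===== PORT B =====
def positions_to_spans_alt (positions : List Int) : List (Int × Int) :=
  let ps := PySem.Set.ofList positions
  let xs := PySem.List.sorted ps (fun x => x) false
  let starts := xs.filter (fun p => !(PySem.Set.contains ps (p - 1)))
  let ends := (xs.filter (fun p => !(PySem.Set.contains ps (p + 1)))).map (fun p => p + 1)
  starts.zip ends

-- ===== PRECONDITION & SPEC =====
def Spec_positions_to_spans (positions : List Int) (out : List (Int × Int)) : Prop := out = positions_to_spans_alt positions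
instance (positions : List Int) (out : List (Int × Int)) : Decidable (Spec_positions_to_spans positions out) := by unfold Spec_positions_to_spans; infer_instance

-- ===== CLAIM =====
def Claim_equal_positions_to_spans : Prop := ∀ (positions : List Int), Dom_positions_to_spans positions → Spec_positions_to_spans positions (positions_to_spans positions)

-- ===== LEMMAS AND PROOFS =====
-- Proof-side intermediate form of A's loop: consume one maximal run at a time.
def pvEatRun (e : Int) (rest : List Int) : Int × List Int :=
  match rest with
  | [] => (e, [])
  | r :: rs => if r = e + 1 then pvEatRun r rs else (e, r :: rs)

theorem pvEatRun_len (e : Int) (rest : List Int) : (pvEatRun e rest).2.length ≤ rest.length := by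
  induction rest generalizing e with
  | nil => simp [pvEatRun]
  | cons r rs ih =>
    simp only [pvEatRun]
    split
    · exact le_trans (ih r) (Nat.le_succ _)
    · simp

def pvGo (xs : List Int) : List (Int × Int) :=
  match xs with
  | [] => []
  | x :: rest =>
    (x, (pvEatRun x rest).1 + 1) :: pvGo (pvEatRun x rest).2
termination_by xs.length
decreasing_by
  exact Nat.lt_succ_of_le (pvEatRun_len x rest)

-- A's fold-then-flush from an arbitrary state equals run-consumption.
theorem loopA_eq (xs : List Int) : ∀ (acc : List (Int × Int)) (start prev : Int),
    (xs.foldl pvStepA (acc, start, prev)).1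
      ++ [((xs.foldl pvStepA (acc, start, prev)).2.1, (xs.foldl pvStepA (acc, start, prev)).2.2 + 1)]
    = acc ++ (start, (pvEatRun prev xs).1 + 1) :: pvGo (pvEatRun prev xs).2 := by
  induction xs with
  | nil => intro acc start prev; simp [pvEatRun, pvGo]
  | cons pos xs ih =>
    intro acc start prev
    simp only [List.foldl_cons, pvStepA, pvEatRun]
    by_cases h : pos = prev + 1
    · simp [h]
      exact ih acc start (prev + 1)
    · simp only [if_neg h]
      rw [ih (acc ++ [(start, prev + 1)]) pos pos]
      simp [pvGo]

-- run-consumption equals the boundary-filter zip, for a strictly increasing list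
-- dropping an absent head from the membership list does not change a boundary filter
theorem pvFilterDropHead (a : Int) (m l : List Int) (f : Int → Int)
    (hne : ∀ p ∈ l, f p ≠ a) :
    l.filter (fun p => !decide (f p ∈ a :: m)) = l.filter (fun p => !decide (f p ∈ m)) := by
  refine List.filter_congr ?_
  intro p hp
  congr 1
  refine decide_eq_decide.mpr ?_
  rw [List.mem_cons]
  exact or_iff_right (hne p hp)

theorem go_eq (xs : List Int) (h : xs.Pairwise (· < ·)) :
    pvGo xs = (xs.filter (fun p => !decide ((p - 1) ∈ xs))).zip
      ((xs.filter (fun p => !decide ((p + 1) ∈ xs))).map (fun p => p + 1)) := by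
  induction xs with
  | nil => simp [pvGo]
  | cons x rest ih =>
    have hx : ∀ p ∈ rest, x < p := (List.pairwise_cons.mp h).1
    have hr : rest.Pairwise (· < ·) := (List.pairwise_cons.mp h).2
    have hxm1 : ¬ (x - 1) ∈ x :: rest := by
      simp only [List.mem_cons]
      rintro (he | hm)
      · omega
      · exact absurd (hx _ hm) (by omega)
    cases rest with
    | nil =>
      have h2 : ¬ (x + 1) ∈ [x] := by simp
      simp [pvGo, pvEatRun, List.filter, hxm1, h2]
    | cons y t =>
      have hy : x < y := hx y (by simp)
      have hyt : ∀ q ∈ t, y < q := (List.pairwise_cons.mp hr).1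
      have hge : ∀ p ∈ y :: t, y ≤ p := by
        intro p hp
        rcases List.mem_cons.mp hp with he | hm
        · omega
        · exact le_of_lt (hyt _ hm)
      by_cases hadj : y = x + 1
      · -- adjacent head: x merges into the first run of rest
        subst hadj
        have hSx : (x :: (x+1) :: t).filter (fun p => !decide ((p - 1) ∈ x :: (x+1) :: t))
            = x :: t.filter (fun p => !decide ((p - 1) ∈ (x+1) :: t)) := by
          rw [List.filter_cons_of_pos (by simp only [decide_eq_false hxm1, Bool.not_false]),
              List.filter_cons_of_neg (by
                have hmem : ((x + 1) - 1) ∈ x :: (x+1) :: t := by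
                  have : (x + 1) - 1 = x := by ring
                  rw [this]; exact List.mem_cons_self
                simp only [decide_eq_true hmem, Bool.not_true]
                exact Bool.false_ne_true),
              pvFilterDropHead x ((x+1) :: t) t (fun p => p - 1)
                (fun p hp => by have := hyt p hp; show p - 1 ≠ x; omega)]
        have hSr : ((x+1) :: t).filter (fun p => !decide ((p - 1) ∈ (x+1) :: t))
            = (x+1) :: t.filter (fun p => !decide ((p - 1) ∈ (x+1) :: t)) := by
          rw [List.filter_cons_of_pos (by
            have hmem : ¬ ((x + 1) - 1) ∈ (x+1) :: t := by
              simp only [List.mem_cons]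
              rintro (he | hm)
              · omega
              · have := hyt _ hm; omega
            simp only [decide_eq_false hmem, Bool.not_false])]
        have hEx : (x :: (x+1) :: t).filter (fun p => !decide ((p + 1) ∈ x :: (x+1) :: t))
            = ((x+1) :: t).filter (fun p => !decide ((p + 1) ∈ (x+1) :: t)) := by
          rw [List.filter_cons_of_neg (by
                have hmem : (x + 1) ∈ x :: (x+1) :: t := by simp
                simp only [decide_eq_true hmem, Bool.not_true]
                exact Bool.false_ne_true),
              pvFilterDropHead x ((x+1) :: t) ((x+1) :: t) (fun p => p + 1)
                (fun p hp => by have := hge p hp; show p + 1 ≠ x; omega)]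
        have hrun : pvEatRun x ((x+1) :: t) = pvEatRun (x+1) t := by
          simp [pvEatRun]
        have hgx : pvGo (x :: (x+1) :: t)
            = (x, (pvEatRun (x+1) t).1 + 1) :: pvGo (pvEatRun (x+1) t).2 := by
          rw [pvGo, hrun]
        have hgr : pvGo ((x+1) :: t)
            = (x+1, (pvEatRun (x+1) t).1 + 1) :: pvGo (pvEatRun (x+1) t).2 := by
          rw [pvGo]
        have ihr := ih hr
        rw [hgr, hSr] at ihr
        rw [hgx, hSx, hEx]
        cases hE : ((x+1) :: t).filter (fun p => !decide ((p + 1) ∈ (x+1) :: t)) with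
        | nil => rw [hE] at ihr; simp at ihr
        | cons e0 E =>
          rw [hE] at ihr
          simp only [List.map_cons, List.zip_cons_cons, List.cons.injEq, Prod.mk.injEq] at ihr
          obtain ⟨⟨-, h1⟩, h2⟩ := ihr
          simp only [List.map_cons, List.zip_cons_cons, h1, h2]
      · -- gap after the head: x forms its own one-element span
        have hSx : (x :: y :: t).filter (fun p => !decide ((p - 1) ∈ x :: y :: t))
            = x :: (y :: t).filter (fun p => !decide ((p - 1) ∈ y :: t)) := by
          rw [List.filter_cons_of_pos (by simp only [decide_eq_false hxm1, Bool.not_false]),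
              pvFilterDropHead x (y :: t) (y :: t) (fun p => p - 1)
                (fun p hp => by have := hge p hp; show p - 1 ≠ x; omega)]
        have hEx : (x :: y :: t).filter (fun p => !decide ((p + 1) ∈ x :: y :: t))
            = x :: (y :: t).filter (fun p => !decide ((p + 1) ∈ y :: t)) := by
          have hxp1 : ¬ ((x + 1) ∈ x :: y :: t) := by
            simp only [List.mem_cons]
            rintro (he | hm)
            · omega
            · have := hge _ (List.mem_cons.mpr hm); omega
          rw [List.filter_cons_of_pos (by simp only [decide_eq_false hxp1, Bool.not_false]),
              pvFilterDropHead x (y :: t) (y :: t) (fun p => p + 1)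
                (fun p hp => by have := hge p hp; show p + 1 ≠ x; omega)]
        have hrun : pvEatRun x (y :: t) = (x, y :: t) := by
          simp [pvEatRun, hadj]
        have hgx : pvGo (x :: y :: t) = (x, x + 1) :: pvGo (y :: t) := by
          rw [pvGo, hrun]
        rw [hgx, hSx, hEx, ih hr]
        simp

theorem main_eq (positions : List Int) :
    positions_to_spans positions = positions_to_spans_alt positions := by
  have hpair := PySem.List.sorted_ofList_pairwise_lt (xs := positions)
  have hmem : ∀ a : Int, (PySem.Set.contains (PySem.Set.ofList positions) a)
      = decide (a ∈ PySem.List.sorted (PySem.Set.ofList positions) (fun x => x) false) := by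
    intro a
    rw [Bool.eq_iff_iff, PySem.Set.contains_iff, decide_eq_true_iff, PySem.List.mem_sorted]
  simp only [positions_to_spans, positions_to_spans_alt]
  rw [List.filter_congr (p := fun p => !(PySem.Set.contains (PySem.Set.ofList positions) (p - 1))) (q := fun p => !decide ((p - 1) ∈ PySem.List.sorted (PySem.Set.ofList positions) (fun x => x) false)) (fun p _ => by simp only [hmem (p - 1)]),
      List.filter_congr (p := fun p => !(PySem.Set.contains (PySem.Set.ofList positions) (p + 1))) (q := fun p => !decide ((p + 1) ∈ PySem.List.sorted (PySem.Set.ofList positions) (fun x => x) false)) (fun p _ => by simp only [hmem (p + 1)])]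
  cases hs : PySem.List.sorted (PySem.Set.ofList positions) (fun x => x) false with
  | nil => simp
  | cons s0 rest =>
    have hgo : pvGo (s0 :: rest)
        = (s0, (pvEatRun s0 rest).1 + 1) :: pvGo (pvEatRun s0 rest).2 := by rw [pvGo]
    simp only []
    rw [loopA_eq rest [] s0 s0, List.nil_append, ← hgo, go_eq _ (hs ▸ hpair)]

-- ===== VERDICT =====
theorem positions_to_spans_spec : Claim_equal_positions_to_spans := by
  intro positions _
  exact main_eq positions
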